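-- pv_equiv track=rewrite | github.com/JoshAugust/Enrichment | hunt_emails.py | score_email
-- ===== SOURCE A (Python) =====
-- def score_email(email, domain=None):
--     """Score email relevance (higher = better)"""
--     email_lower = email.lower()
--     score = 0
--
--     # If it matches the company domain, very good
--     if domain and domain.lower() in email_lower:
--         score += 100
--
--     # Preferred prefixes
--     good_prefixes = ['info', 'contact', 'agent', 'insurance', 'office', 'admin', 'mail', 'hello', 'team', 'support']
--     for prefix in good_prefixes:
--         if email_lower.startswith(prefix + '@'):
--             score += 50
--             break
--
--     return score
-- ===== SOURCE B (Python) =====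
-- _PREFIXES = ['info', 'contact', 'agent', 'insurance', 'office', 'admin', 'mail', 'hello', 'team', 'support']
--
--
-- def _build_table():
--     """Compile the preferred prefixes into a trie/DFA transition table."""
--     trans = {}          # (state, char) -> state
--     accept = set()      # states reached after reading a full "prefix@"
--     next_state = 1
--     for word in _PREFIXES:
--         state = 0
--         for ch in word + '@':
--             key = (state, ch)
--             if key not in trans:
--                 trans[key] = next_state
--                 next_state += 1
--             state = trans[key]
--         accept.add(state)
--     return trans, accept
--
--
-- _TRANS, _ACCEPT = _build_table()
--
--
-- def _prefix_hit(s):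
--     """Walk the DFA over s; True iff some preferred 'prefix@' heads s."""
--     state = 0
--     for ch in s:
--         nxt = _TRANS.get((state, ch))
--         if nxt is None:
--             return False
--         if nxt in _ACCEPT:
--             return True
--         state = nxt
--     return False
--
--
-- def score_email(email, domain=None):
--     """Score email relevance (higher = better)"""
--     email_lower = email.lower()
--     score = 100 if (domain and domain.lower() in email_lower) else 0
--     if _prefix_hit(email_lower):
--         score += 50
--     return score
-- ===== Notes on version B (the rewrite author's own statement) =====
-- stated objective: alternative
-- what changed: Instead of looping over the ten prefixes testing startswith on each candidate prefix-plus-separator, B compiles the prefixes once into a trie/DFA transition table and walks the email character by character, stopping at the first dead end or accepting state.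
import Mathlib
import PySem

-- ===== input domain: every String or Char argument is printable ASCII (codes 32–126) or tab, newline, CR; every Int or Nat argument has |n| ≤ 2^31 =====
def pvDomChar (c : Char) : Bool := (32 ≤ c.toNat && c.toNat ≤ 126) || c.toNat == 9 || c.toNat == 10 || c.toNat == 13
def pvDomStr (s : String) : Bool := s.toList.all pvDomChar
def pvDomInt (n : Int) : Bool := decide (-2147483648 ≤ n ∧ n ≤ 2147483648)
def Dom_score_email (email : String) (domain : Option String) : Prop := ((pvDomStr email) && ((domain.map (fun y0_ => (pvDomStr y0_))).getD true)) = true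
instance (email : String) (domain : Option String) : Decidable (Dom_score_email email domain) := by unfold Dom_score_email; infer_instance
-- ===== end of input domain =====

-- B replaces A's per-prefix startswith loop by a trie/DFA compiled once from the prefixes and a single
-- character-by-character walk over the email; objective: alternative (different data structure and traversal).

-- ===== PORT A =====
-- good_prefixes, as lists of chars
def pvGoodPrefixes : List (List Char) :=
  ["info", "contact", "agent", "insurance", "office", "admin", "mail", "hello", "team", "support"].map String.toList

-- 'for prefix in good_prefixes: if email_lower.startswith(prefix + '@'): score += 50; break'
def pvPrefixLoopA (emailLower : List Char) : List (List Char) → Int → Int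
  | [], score => score
  | p :: rest, score =>
    if PySem.Chars.startswith emailLower (p ++ ['@']) then score + 50
    else pvPrefixLoopA emailLower rest score

def score_email (email : String) (domain : Option String) : Int :=
  let emailLower := PySem.Chars.lower email.toList
  let score : Int := 0
  let score :=
    match domain with
    | none => score            -- 'if domain and …': None is falsy
    | some d =>                -- '' is falsy too
      if d.toList ≠ [] ∧ PySem.Chars.isIn (PySem.Chars.lower d.toList) emailLower = true
      then score + 100 else score
  pvPrefixLoopA emailLower pvGoodPrefixes score

-- ===== PORT B =====
-- _PREFIXES (same ten words)
def pvWords : List (List Char) :=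
  ["info", "contact", "agent", "insurance", "office", "admin", "mail", "hello", "team", "support"].map String.toList

-- _build_table(): trans : dict (state, char) -> state; accept : set of states; next_state counter.
-- inner loop 'for ch in word + '@'' over state (trans, next_state, state):
--   'if key not in trans: trans[key]=next_state; next_state+=1' then 'state = trans[key]'
--   (the match below is that update-then-read, step for step)
def pvBuild : PySem.Dict (Int × Char) Int × PySem.Set Int :=
  let out := pvWords.foldl
    (fun (acc : PySem.Dict (Int × Char) Int × PySem.Set Int × Int) (word : List Char) =>
      let trans := acc.1
      let accept := acc.2.1
      let next := acc.2.2
      let inner := (word ++ ['@']).foldl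
        (fun (st : PySem.Dict (Int × Char) Int × Int × Int) ch =>
          let trans := st.1
          let next := st.2.1
          let state := st.2.2
          match trans.get? (state, ch) with
          | none => (trans.insert (state, ch) next, next + 1, next)
          | some t => (trans, next, t))
        (trans, next, (0 : Int))
      (inner.1, PySem.Set.add accept inner.2.2, inner.2.1))
    (PySem.Dict.empty, PySem.Set.empty, (1 : Int))
  (out.1, out.2.1)

def pvTrans : PySem.Dict (Int × Char) Int := pvBuild.1
def pvAccept : PySem.Set Int := pvBuild.2

-- _prefix_hit(s): walk the DFA, early return on dead end or accept
def pvWalk : Int → List Char → Bool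
  | _, [] => false
  | state, ch :: rest =>
    match pvTrans.get? (state, ch) with
    | none => false
    | some t => if PySem.Set.contains pvAccept t then true else pvWalk t rest

def score_email_alt (email : String) (domain : Option String) : Int :=
  let emailLower := PySem.Chars.lower email.toList
  let score : Int :=
    match domain with
    | none => 0                -- 'if domain and …': None is falsy
    | some d =>                -- '' is falsy too
      if d.toList ≠ [] ∧ PySem.Chars.isIn (PySem.Chars.lower d.toList) emailLower = true
      then 100 else 0
  if pvWalk 0 emailLower then score + 50 else score

-- ===== PRECONDITION & SPEC =====
def Spec_score_email (email : String) (domain : Option String) (out : Int) : Prop := out = score_email_alt email domain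
instance (email : String) (domain : Option String) (out : Int) : Decidable (Spec_score_email email domain out) := by unfold Spec_score_email; infer_instance

-- ===== CLAIM (what is proved, stated in full; the proofs are below) =====
def Claim_equal_score_email : Prop := ∀ (email : String) (domain : Option String), Dom_score_email email domain → Spec_score_email email domain (score_email email domain)

-- ===== LEMMAS AND PROOFS =====

-- the ten tokens the DFA accepts: each prefix followed by '@'
def pvHeads : List (List Char) := pvGoodPrefixes.map (fun p => p ++ ['@'])

-- the DFA's NON-accepting reachable states, each with the unique string leading to it from state 0
def pvNodes : List (Int × List Char) :=
  [(0, ""), (1, "i"), (2, "in"), (3, "inf"), (4, "info"), (6, "c"), (7, "co"), (8, "con"),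
   (9, "cont"), (10, "conta"), (11, "contac"), (12, "contact"), (14, "a"), (15, "ag"),
   (16, "age"), (17, "agen"), (18, "agent"), (20, "ins"), (21, "insu"), (22, "insur"),
   (23, "insura"), (24, "insuran"), (25, "insuranc"), (26, "insurance"), (28, "o"),
   (29, "of"), (30, "off"), (31, "offi"), (32, "offic"), (33, "office"), (35, "ad"),
   (36, "adm"), (37, "admi"), (38, "admin"), (40, "m"), (41, "ma"), (42, "mai"),
   (43, "mail"), (45, "h"), (46, "he"), (47, "hel"), (48, "hell"), (49, "hello"),
   (51, "t"), (52, "te"), (53, "tea"), (54, "team"), (56, "s"), (57, "su"), (58, "sup"),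
   (59, "supp"), (60, "suppo"), (61, "suppor"), (62, "support")].map
    (fun p => (p.1, p.2.toList))

-- no accepted token is a prefix of a non-accepting node's string
set_option maxRecDepth 1000000 in
theorem pvN1 : ∀ p ∈ pvNodes, ∀ h ∈ pvHeads, ¬ (h <+: p.2) := by decide

-- every transition out of a node leads to the node (or accepting token) for the extended string
set_option maxRecDepth 1000000 in
theorem pvN2 : ∀ p ∈ pvNodes, ∀ e ∈ pvTrans.items, e.1.1 = p.1 →
    (if PySem.Set.contains pvAccept e.2 then p.2 ++ [e.1.2] ∈ pvHeads
     else (e.2, p.2 ++ [e.1.2]) ∈ pvNodes) := by decide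

-- the table is complete along every accepted token
set_option maxRecDepth 1000000 in
theorem pvN3 : ∀ p ∈ pvNodes, ∀ h ∈ pvHeads, p.2 <+: h → p.2.length < h.length →
    (pvTrans.get? (p.1, h.getD p.2.length ' ')).isSome := by decide

-- definitional unfoldings of the walk (cheap: no table evaluation)
set_option maxRecDepth 1000000 in
theorem pvWalk_nil (s : Int) : pvWalk s [] = false := rfl

set_option maxRecDepth 1000000 in
theorem pvWalk_cons (s : Int) (c : Char) (rest : List Char) :
    pvWalk s (c :: rest) =
      (match pvTrans.get? (s, c) with
       | none => false
       | some t => if PySem.Set.contains pvAccept t then true else pvWalk t rest) := rfl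

-- walking the DFA from the node of w detects exactly 'some token heads w ++ cs'
set_option maxRecDepth 1000000 in
theorem pvWalk_iff (cs : List Char) : ∀ s w, (s, w) ∈ pvNodes →
    (pvWalk s cs = true ↔ ∃ h ∈ pvHeads, h <+: w ++ cs) := by
  induction cs with
  | nil =>
    intro s w hsw
    rw [pvWalk_nil]
    simp only [List.append_nil, Bool.false_eq_true, false_iff]
    rintro ⟨h, hh, hpre⟩
    exact pvN1 (s, w) hsw h hh hpre
  | cons c rest ih =>
    intro s w hsw
    cases hget : pvTrans.get? (s, c) with
    | none =>
      rw [pvWalk_cons, hget]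
      simp only [Bool.false_eq_true, false_iff]
      rintro ⟨h, hh, hpre⟩
      by_cases hlen : h.length ≤ w.length
      · exact pvN1 (s, w) hsw h hh
          (List.prefix_of_prefix_length_le hpre (List.prefix_append w (c :: rest)) hlen)
      · rw [not_le] at hlen
        have hwh : w <+: h :=
          List.prefix_of_prefix_length_le (List.prefix_append w (c :: rest)) hpre (by omega)
        have hch : h[w.length]? = some c := by
          rcases hpre with ⟨t, ht⟩
          have : (w ++ c :: rest)[w.length]? = some c := by
            rw [List.getElem?_append_right (le_refl _)]
            simp
          rw [← ht, List.getElem?_append_left hlen] at this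
          exact this
        have hd : h.getD w.length ' ' = c := by
          simp [List.getD, hch]
        have := pvN3 (s, w) hsw h hh hwh hlen
        rw [hd, hget] at this
        simp at this
    | some t =>
      have hmem : ((s, c), t) ∈ pvTrans.items :=
        PySem.Dict.mem_items_of_get?_eq_some pvTrans hget
      have h2 := pvN2 (s, w) hsw ((s, c), t) hmem rfl
      by_cases hacc : PySem.Set.contains pvAccept t = true
      · rw [if_pos hacc] at h2
        rw [pvWalk_cons, hget]
        simp only [if_pos hacc, true_iff]
        exact ⟨w ++ [c], h2, rest, (List.append_cons w c rest).symm⟩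
      · rw [if_neg hacc] at h2
        rw [pvWalk_cons, hget]
        simp only [if_neg hacc]
        rw [ih t (w ++ [c]) h2]
        simp only [List.append_assoc, List.singleton_append]

-- A's break-loop adds 50 iff some prefix matches
theorem pvPrefixLoopA_eq_any (cs : List Char) (ps : List (List Char)) (s : Int) :
    pvPrefixLoopA cs ps s =
      if ps.any (fun p => PySem.Chars.startswith cs (p ++ ['@'])) then s + 50 else s := by
  induction ps with
  | nil => simp [pvPrefixLoopA]
  | cons p rest ih =>
    by_cases h : PySem.Chars.startswith cs (p ++ ['@']) = true <;>
      simp [pvPrefixLoopA, h, ih]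

-- A's loop condition equals B's DFA walk
set_option maxRecDepth 1000000 in
theorem pv_any_eq_walk (cs : List Char) :
    pvGoodPrefixes.any (fun p => PySem.Chars.startswith cs (p ++ ['@'])) = pvWalk 0 cs := by
  have h := pvWalk_iff cs 0 [] (by decide)
  simp only [List.nil_append] at h
  rw [Bool.eq_iff_iff, List.any_eq_true, h]
  constructor
  · rintro ⟨p, hp, hsw⟩
    exact ⟨p ++ ['@'], List.mem_map_of_mem hp,
      (PySem.Chars.startswith_iff cs (p ++ ['@'])).mp hsw⟩
  · rintro ⟨h', hh, hpre⟩
    obtain ⟨p, hp, rfl⟩ := List.mem_map.mp hh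
    exact ⟨p, hp, (PySem.Chars.startswith_iff _ _).mpr hpre⟩

-- ===== VERDICT (by name: the statement is the Claim_ definition above) =====
theorem score_email_spec : Claim_equal_score_email := by
  intro email domain _
  unfold Spec_score_email score_email score_email_alt
  simp only
  rw [pvPrefixLoopA_eq_any, pv_any_eq_walk]
  cases domain with
  | none => split <;> norm_num
  | some d => split <;> split <;> norm_num
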